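-- pv_equiv track=rewrite | github.com/ChampionTej05/LeetCodeChallenges | Number_of_flowers_in_full_bloom.py | fullBloomFlowers
-- ===== SOURCE A (Python) =====
-- def fullBloomFlowers(flowers, people):
--     """
--     :type flowers: List[List[int]]
--     :type people: List[int]
--     :rtype: List[int]
--     """
--     import bisect
--
--     flower_blooming_start = sorted([x[0] for x in flowers])
--     flower_blooming_end = sorted([x[1] for x in flowers])
--
--     ans = []
--
--     for person_t in people:
--         # at this person_t
--         # flowers that would have bloomed
--         flowers_that_would_have_bloomed = bisect.bisect_right(flower_blooming_start, person_t)
--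
--         flowers_that_have_stopped_blooming = bisect.bisect_left(flower_blooming_end, person_t)
--
--         ans.append(flowers_that_would_have_bloomed-flowers_that_have_stopped_blooming)
--
--     return ans
-- ===== SOURCE B (Python) =====
-- def fullBloomFlowers(flowers, people):
--     # Event sweep: one sorted pass over (time, delta) events and over people
--     # sorted by time, instead of two binary searches per person.
--     events = []
--     for f in flowers:
--         events.append((f[0], 1))
--         events.append((f[1] + 1, -1))
--     events.sort(key=lambda e: e[0])
--     order = sorted(range(len(people)), key=lambda i: people[i])
--     ans = [0] * len(people)
--     j = 0
--     blooming = 0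
--     for i in order:
--         t = people[i]
--         while j < len(events) and events[j][0] <= t:
--             blooming += events[j][1]
--             j += 1
--         ans[i] = blooming
--     return ans
-- ===== Notes on version B (the rewrite author's own statement) =====
-- stated objective: alternative
-- what changed: Replaces the two sorted arrays with per-person binary searches by a single event sweep: (start,+1)/(end+1,-1) events sorted by time are consumed once by a pointer while people are visited in sorted order, writing a running counter into each person's original slot.
import Mathlib
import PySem

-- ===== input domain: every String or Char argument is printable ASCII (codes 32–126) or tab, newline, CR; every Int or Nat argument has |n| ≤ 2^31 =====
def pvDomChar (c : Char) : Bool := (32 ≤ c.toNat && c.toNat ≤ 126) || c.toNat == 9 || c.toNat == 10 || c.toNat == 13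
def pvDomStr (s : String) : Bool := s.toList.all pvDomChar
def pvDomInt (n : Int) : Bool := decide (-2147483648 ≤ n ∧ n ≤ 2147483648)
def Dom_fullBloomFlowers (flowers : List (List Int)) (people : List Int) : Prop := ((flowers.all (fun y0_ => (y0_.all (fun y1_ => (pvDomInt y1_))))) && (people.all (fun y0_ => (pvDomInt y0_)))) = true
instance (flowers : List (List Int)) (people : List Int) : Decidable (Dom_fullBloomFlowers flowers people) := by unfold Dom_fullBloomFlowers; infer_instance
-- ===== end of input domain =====

-- B replaces A's per-person binary searches over two sorted arrays by a single
-- event sweep over (time, delta) events and people visited in sorted time order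
-- (alternative algorithm, similar cost); equal to A's return value on Pre_.


-- ===== PORT A =====
-- x[0] / x[1]: Python raises IndexError on a flower with fewer than 2 entries;
-- Pre_ excludes those inputs, so the default of pyGetD is never reached.
def fullBloomFlowers (flowers : List (List Int)) (people : List Int) : List Int :=
  let starts := PySem.List.sorted (flowers.map (fun x => PySem.List.pyGetD x 0 0)) (fun s => s) false
  let ends := PySem.List.sorted (flowers.map (fun x => PySem.List.pyGetD x 1 0)) (fun s => s) false
  people.foldl (fun ans t =>
    ans ++ [((PySem.List.bisectRight starts t : Int) - (PySem.List.bisectLeft ends t : Int))]) []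

-- ===== PORT B =====
-- f[0] / f[1] as in port A: Pre_ keeps the pyGetD defaults unreachable.
def bEvents (flowers : List (List Int)) : List (Int × Int) :=
  flowers.foldl (fun es f =>
    es ++ [(PySem.List.pyGetD f 0 0, (1 : Int)), (PySem.List.pyGetD f 1 0 + 1, (-1 : Int))]) []

-- the inner 'while' loop: consume every event with time <= t, updating blooming
def bConsume (t : Int) : List (Int × Int) → Int → (List (Int × Int)) × Int
  | [], b => ([], b)
  | e :: es, b => if e.1 ≤ t then bConsume t es (b + e.2) else (e :: es, b)

-- the 'for i in order' loop; ans[i] = blooming (i comes from range(len(people)), so i ≥ 0)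
def bLoop (people : List Int) : List Int → List (Int × Int) → Int → List Int → List Int
  | [], _, _, ans => ans
  | i :: rest, evs, b, ans =>
    let t := PySem.List.pyGetD people i 0
    let r := bConsume t evs b
    bLoop people rest r.1 r.2 (ans.set i.toNat r.2)

def fullBloomFlowers_alt (flowers : List (List Int)) (people : List Int) : List Int :=
  let events := PySem.List.sorted (bEvents flowers) (fun e => e.1) false
  let order := PySem.List.sorted (PySem.List.pyRange 0 people.length 1)
      (fun i => PySem.List.pyGetD people i 0) false
  bLoop people order events 0 (List.replicate people.length 0)

-- ===== PRECONDITION & SPEC =====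
-- Pre_ excludes exactly the inputs where A raises IndexError: a flower with
-- fewer than two entries (A reads x[0] and x[1]); B raises there as well.
def Pre_fullBloomFlowers (flowers : List (List Int)) (people : List Int) : Prop :=
  ∀ f ∈ flowers, 2 ≤ f.length

instance (flowers : List (List Int)) (people : List Int) : Decidable (Pre_fullBloomFlowers flowers people) := by
  unfold Pre_fullBloomFlowers; infer_instance

def pvWitness_fullBloomFlowers : List (List Int) × List Int :=
  ([[1, 6], [3, 7], [9, 12], [4, 13]], [2, 3, 7, 11])

def Spec_fullBloomFlowers (flowers : List (List Int)) (people : List Int) (out : List Int) : Prop := out = fullBloomFlowers_alt flowers people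
instance (flowers : List (List Int)) (people : List Int) (out : List Int) : Decidable (Spec_fullBloomFlowers flowers people out) := by unfold Spec_fullBloomFlowers; infer_instance

-- ===== CLAIM (what is proved, stated in full; the proofs are below) =====
def Claim_equal_fullBloomFlowers : Prop := ∀ (flowers : List (List Int)) (people : List Int), Dom_fullBloomFlowers flowers people → Pre_fullBloomFlowers flowers people → Spec_fullBloomFlowers flowers people (fullBloomFlowers flowers people)

-- ===== LEMMAS AND PROOFS =====

-- the per-time count both programs compute: #(starts ≤ t) − #(ends < t)
def bCount (flowers : List (List Int)) (t : Int) : Int :=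
  ((flowers.map (fun x => PySem.List.pyGetD x 0 0)).countP (fun s => decide (s ≤ t)) : Int)
  - ((flowers.map (fun x => PySem.List.pyGetD x 1 0)).countP (fun e => decide (e < t)) : Int)

-- sum of the deltas of all events with time ≤ t
def bSum (E : List (Int × Int)) (t : Int) : Int :=
  ((E.filter (fun e => decide (e.1 ≤ t))).map (fun e => e.2)).sum

lemma countP_eq_of_split {xs : List Int} {p : Int → Bool} {k : Nat}
    (hk : k ≤ xs.length)
    (h1 : ∀ j (hj : j < xs.length), j < k → p xs[j])
    (h2 : ∀ j (hj : j < xs.length), k ≤ j → ¬ p xs[j]) :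
    xs.countP p = k := by
  induction xs generalizing k with
  | nil => simp at hk ⊢; omega
  | cons x t ih =>
    cases k with
    | zero =>
      rw [List.countP_eq_zero.mpr]
      intro a ha
      obtain ⟨j, hj, rfl⟩ := List.mem_iff_getElem.mp ha
      exact h2 j hj (Nat.zero_le j)
    | succ k =>
      have hx : p x := h1 0 (by simp) (Nat.succ_pos k)
      rw [List.countP_cons_of_pos (p := p) hx]
      have : t.countP p = k := by
        apply ih (by simpa using hk)
        · intro j hj hjk; exact h1 (j+1) (by simpa using hj) (by omega)
        · intro j hj hjk; exact h2 (j+1) (by simpa using hj) (by omega)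
      omega

lemma bisectRight_eq_countP (xs : List Int) (t : Int) :
    PySem.List.bisectRight (PySem.List.sorted xs (fun s => s) false) t
      = xs.countP (fun s => decide (s ≤ t)) := by
  have hpw := PySem.List.sorted_pairwise xs (fun s => s)
  obtain ⟨hle, h1, h2⟩ := PySem.List.bisectRight_spec (PySem.List.sorted xs (fun s => s) false) t hpw
  rw [← (PySem.List.sorted_perm xs (fun s => s) false).countP_eq]
  exact (countP_eq_of_split hle (fun j hj hjk => by simpa using h1 j hj hjk)
    (fun j hj hjk => by simpa using h2 j hj hjk)).symm

lemma bisectLeft_eq_countP (xs : List Int) (t : Int) :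
    PySem.List.bisectLeft (PySem.List.sorted xs (fun s => s) false) t
      = xs.countP (fun s => decide (s < t)) := by
  have hpw := PySem.List.sorted_pairwise xs (fun s => s)
  obtain ⟨hle, h1, h2⟩ := PySem.List.bisectLeft_spec (PySem.List.sorted xs (fun s => s) false) t hpw
  rw [← (PySem.List.sorted_perm xs (fun s => s) false).countP_eq]
  exact (countP_eq_of_split hle (fun j hj hjk => by simpa using h1 j hj hjk)
    (fun j hj hjk => by simpa using h2 j hj hjk)).symm

-- A's per-person value is bCount
lemma bisect_eq_bCount (flowers : List (List Int)) (t : Int) :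
    (PySem.List.bisectRight (PySem.List.sorted (flowers.map (fun x => PySem.List.pyGetD x 0 0)) (fun s => s) false) t : Int)
    - (PySem.List.bisectLeft (PySem.List.sorted (flowers.map (fun x => PySem.List.pyGetD x 1 0)) (fun s => s) false) t : Int)
    = bCount flowers t := by
  rw [bisectRight_eq_countP, bisectLeft_eq_countP]; rfl

lemma bSum_append (E F : List (Int × Int)) (t : Int) :
    bSum (E ++ F) t = bSum E t + bSum F t := by
  simp [bSum, List.filter_append]

-- the raw event list carries the same per-time count
lemma bSum_events (flowers : List (List Int)) (t : Int) :
    bSum (bEvents flowers) t = bCount flowers t := by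
  unfold bEvents
  rw [PySem.List.foldl_append_eq_flatMap, List.nil_append]
  induction flowers with
  | nil => simp [bSum, bCount]
  | cons f fs ih =>
    rw [List.flatMap_cons, bSum_append, ih]
    have hlt : (PySem.List.pyGetD f 1 0 + 1 ≤ t) ↔ (PySem.List.pyGetD f 1 0 < t) := by omega
    simp only [bCount, List.map_cons, List.countP_cons]
    by_cases h1 : PySem.List.pyGetD f 0 0 ≤ t
    · by_cases h2 : PySem.List.pyGetD f 1 0 < t
      · simp [bSum, h1, h2, hlt.mpr h2]
      · simp [bSum, h1, h2]; ring
    · by_cases h2 : PySem.List.pyGetD f 1 0 < t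
      · simp [bSum, h1, h2, hlt.mpr h2]; ring
      · simp [bSum, h1, h2]

-- and so does the sorted one
lemma bSum_sorted_events (flowers : List (List Int)) (t : Int) :
    bSum (PySem.List.sorted (bEvents flowers) (fun e => e.1) false) t = bCount flowers t := by
  rw [← bSum_events flowers t]
  unfold bSum
  rw [((PySem.List.sorted_perm (bEvents flowers) (fun e => e.1) false).filter _).map (fun e => e.2) |>.sum_eq]

-- the while loop on a time-sorted event list: split at t, add the deltas ≤ t
lemma bConsume_sorted (t : Int) (evs : List (Int × Int))
    (h : evs.Pairwise (fun a c => a.1 ≤ c.1)) : ∀ (b : Int),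
    bConsume t evs b =
      (evs.filter (fun e => decide (t < e.1)),
       b + ((evs.filter (fun e => decide (e.1 ≤ t))).map (fun e => e.2)).sum) := by
  induction evs with
  | nil => intro b; simp [bConsume]
  | cons e es ih =>
    intro b
    rw [List.pairwise_cons] at h
    by_cases he : e.1 ≤ t
    · rw [bConsume, if_pos he, ih h.2]
      simp [he, not_lt.mpr he]
      ring
    · have hall : ∀ x ∈ es, ¬ x.1 ≤ t := fun x hx => fun hc => he (le_trans (h.1 x hx) hc)
      rw [bConsume, if_neg he]
      have h1 : List.filter (fun e => decide (t < e.1)) (e :: es) = e :: es := by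
        rw [List.filter_eq_self]
        intro a ha; rcases List.mem_cons.mp ha with rfl | ha'
        · simpa using not_le.mp he
        · simpa using not_le.mp (hall a ha')
      have h2 : List.filter (fun e => decide (e.1 ≤ t)) (e :: es) = [] := by
        rw [List.filter_eq_nil_iff]
        intro a ha; rcases List.mem_cons.mp ha with rfl | ha'
        · simpa using he
        · simpa using hall a ha'
      rw [h1, h2]; simp

lemma bSum_step (E : List (Int × Int)) (tprev t : Int) (h : tprev ≤ t) :
    bSum E tprev + (((E.filter (fun e => decide (tprev < e.1))).filter (fun e => decide (e.1 ≤ t))).map (fun e => e.2)).sum = bSum E t := by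
  rw [List.filter_filter]
  induction E with
  | nil => simp [bSum]
  | cons e E ih =>
    simp only [bSum, List.filter_cons] at ih ⊢
    by_cases h1 : e.1 ≤ tprev
    · simp [h1, not_lt.mpr h1, le_trans h1 h]
      linarith [ih]
    · by_cases h2 : e.1 ≤ t
      · simp [h1, not_le.mp h1, h2]
        linarith [ih]
      · simp [h1, h2]
        linarith [ih]

lemma filter_filter_lt (E : List (Int × Int)) (tprev t : Int) (h : tprev ≤ t) :
    (E.filter (fun e => decide (tprev < e.1))).filter (fun e => decide (t < e.1))
      = E.filter (fun e => decide (t < e.1)) := by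
  rw [List.filter_filter]
  apply List.filter_congr
  intro x _
  by_cases hx : t < x.1
  · simp [hx, lt_of_le_of_lt h hx]
  · simp [hx]

-- the main loop is a fold of writes of the final per-person counts
lemma bLoop_spec (people : List Int) (E : List (Int × Int))
    (hE : E.Pairwise (fun a c => a.1 ≤ c.1)) :
    ∀ (order : List Int) (tprev : Int) (ans : List Int),
    (∀ i ∈ order, tprev ≤ PySem.List.pyGetD people i 0) →
    order.Pairwise (fun a c => PySem.List.pyGetD people a 0 ≤ PySem.List.pyGetD people c 0) →
    bLoop people order (E.filter (fun e => decide (tprev < e.1))) (bSum E tprev) ans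
      = order.foldl (fun a i => a.set i.toNat (bSum E (PySem.List.pyGetD people i 0))) ans := by
  intro order
  induction order with
  | nil => intro tprev ans _ _; rfl
  | cons i rest ih =>
    intro tprev ans hlb hpw
    rw [List.pairwise_cons] at hpw
    set t := PySem.List.pyGetD people i 0 with ht
    have htp : tprev ≤ t := hlb i (List.mem_cons_self ..)
    rw [bLoop]
    rw [bConsume_sorted t _ (hE.filter _)]
    simp only []
    rw [filter_filter_lt E tprev t htp, bSum_step E tprev t htp]
    rw [ih t _ (fun j hj => hpw.1 j hj) hpw.2]
    rfl

-- writes at distinct nonnegative indices: position j holds g j once j was written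
lemma foldl_set_getElem? (g : Int → Int) (ord : List Int) (j : Nat)
    (h0 : ∀ i ∈ ord, 0 ≤ i) : ∀ (a : List Int),
    (ord.foldl (fun a i => a.set i.toNat (g i)) a)[j]? =
      if (j : Int) ∈ ord then (if j < a.length then some (g j) else none) else a[j]? := by
  induction ord with
  | nil => intro a; simp
  | cons i rest ih =>
    intro a
    rw [List.foldl_cons, ih (fun x hx => h0 x (List.mem_cons_of_mem _ hx))]
    have hi : 0 ≤ i := h0 i (List.mem_cons_self ..)
    by_cases hmem : (j : Int) ∈ rest
    · simp [hmem, List.length_set]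
    · simp only [hmem, if_false, List.mem_cons, List.getElem?_set, List.length_set]
      by_cases hij : (j : Int) = i
      · have : i.toNat = j := by omega
        simp [hij, this]
      · have : i.toNat ≠ j := by omega
        simp [hij, this]

lemma alt_eq_map (flowers : List (List Int)) (people : List Int) :
    fullBloomFlowers_alt flowers people = people.map (bCount flowers) := by
  unfold fullBloomFlowers_alt
  set E := PySem.List.sorted (bEvents flowers) (fun e => e.1) false with hEdef
  set order := PySem.List.sorted (PySem.List.pyRange 0 people.length 1)
      (fun i => PySem.List.pyGetD people i 0) false with horder
  have hE : E.Pairwise (fun a c => a.1 ≤ c.1) :=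
    PySem.List.sorted_pairwise (bEvents flowers) (fun e => e.1)
  have hordmem : ∀ i ∈ order, 0 ≤ i ∧ i < (people.length : Int) := by
    intro i hi
    rw [horder, PySem.List.mem_sorted, PySem.List.mem_pyRange_one] at hi
    exact hi
  -- a lower bound below every event time and every person's time
  obtain ⟨tprev, hev, hppl⟩ :
      ∃ tprev, (∀ e ∈ E, tprev < e.1) ∧ (∀ i ∈ order, tprev ≤ PySem.List.pyGetD people i 0) := by
    refine ⟨((E.map (fun e => e.1)) ++ people).foldl min 0 - 1, ?_, ?_⟩
    · intro e he
      have := (PySem.List.foldl_min_le ((E.map (fun e => e.1)) ++ people) 0).2 e.1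
        (List.mem_append_left _ (List.mem_map_of_mem he))
      omega
    · intro i hi
      obtain ⟨h0, h1⟩ := hordmem i hi
      rw [PySem.List.pyGetD_eq_getElem people 0 h0 h1]
      have := (PySem.List.foldl_min_le ((E.map (fun e => e.1)) ++ people) 0).2 people[i.toNat]
        (List.mem_append_right _ (people.getElem_mem _))
      omega
  have hfil : E.filter (fun e => decide (tprev < e.1)) = E :=
    List.filter_eq_self.mpr (fun e he => by simpa using hev e he)
  have hsum : bSum E tprev = 0 := by
    unfold bSum
    rw [List.filter_eq_nil_iff.mpr (fun e he => by simpa using not_le.mpr (hev e he))]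
    rfl
  rw [← hfil, ← hsum,
    bLoop_spec people E hE order tprev _ hppl
      (PySem.List.sorted_pairwise (PySem.List.pyRange 0 people.length 1) (fun i => PySem.List.pyGetD people i 0))]
  simp only [hEdef, bSum_sorted_events]
  apply List.ext_getElem?
  intro j
  rw [foldl_set_getElem? _ order j (fun i hi => (hordmem i hi).1)]
  have hmem : ((j : Int) ∈ order) ↔ j < people.length := by
    rw [horder, PySem.List.mem_sorted, PySem.List.mem_pyRange_one]
    constructor
    · intro ⟨_, h⟩; exact_mod_cast h
    · intro h; exact ⟨Int.natCast_nonneg j, by exact_mod_cast h⟩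
  by_cases hj : j < people.length
  · rw [if_pos (hmem.mpr hj), if_pos (by simpa using hj), List.getElem?_map,
      List.getElem?_eq_getElem hj]
    rw [PySem.List.pyGetD_eq_getElem people 0 (Int.natCast_nonneg j) (by exact_mod_cast hj)]
    simp
  · rw [if_neg (fun hc => hj (hmem.mp hc)), List.getElem?_eq_none (by simpa using Nat.le_of_not_lt hj),
      List.getElem?_eq_none (by simpa using Nat.le_of_not_lt hj)]

-- ===== VERDICT (by name: the statement is the Claim_ definition above) =====
theorem fullBloomFlowers_spec : Claim_equal_fullBloomFlowers := by
  intro flowers people _ _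
  unfold Spec_fullBloomFlowers fullBloomFlowers
  rw [alt_eq_map]
  simp only [PySem.List.foldl_append_singleton_eq_map, List.nil_append]
  exact List.map_congr_left (fun t _ => bisect_eq_bCount flowers t)
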